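-- pv_equiv track=rewrite | github.com/NMTruong221123/caro | backend/services/online_service.py | _next_active_player_index
-- ===== SOURCE A (Python) =====
-- from typing import Any, Dict, Optional
--
-- def _next_active_player_index(current_player: int, active_indices: list[int]) -> Optional[int]:
--     if not active_indices:
--         return None
--
--     ordered = sorted({int(item) for item in active_indices})
--     current = int(current_player)
--     if current in ordered:
--         return current
--
--     for index in ordered:
--         if index > current:
--             return index
--     return ordered[0]
-- ===== SOURCE B (Python) =====
-- from typing import Optional
--
-- def _next_active_player_index(current_player: int, active_indices: list[int]) -> Optional[int]:
--     actives = {int(x) for x in active_indices}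
--     if not actives:
--         return None
--     current = int(current_player)
--     if current in actives:
--         return current
--     greater = [i for i in actives if i > current]
--     if greater:
--         return min(greater)
--     return min(actives)
-- ===== Notes on version B (the rewrite author's own statement) =====
-- stated objective: simpler
-- what changed: Drops the sort entirely: instead of sorting the dedup set and scanning it in order, B partitions the set around current and returns min(greater) when non-empty, else min(actives) for wraparound.
import Mathlib
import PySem

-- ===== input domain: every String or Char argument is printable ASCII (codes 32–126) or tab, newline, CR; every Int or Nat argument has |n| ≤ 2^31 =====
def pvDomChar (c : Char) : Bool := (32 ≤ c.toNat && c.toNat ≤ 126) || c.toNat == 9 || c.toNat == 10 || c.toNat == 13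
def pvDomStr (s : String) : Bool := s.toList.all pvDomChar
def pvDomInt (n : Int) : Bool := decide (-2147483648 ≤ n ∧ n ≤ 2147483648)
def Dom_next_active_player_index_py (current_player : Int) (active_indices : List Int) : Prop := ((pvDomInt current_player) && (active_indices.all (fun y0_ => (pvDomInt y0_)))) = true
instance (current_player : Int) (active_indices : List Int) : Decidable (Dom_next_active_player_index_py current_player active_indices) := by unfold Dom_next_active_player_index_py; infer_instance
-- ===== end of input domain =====

-- B drops A's sort: it partitions the dedup set around `current` and takes min(greater) / min(actives) instead of scanning a sorted list (objective: simpler).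

-- ===== PORT A =====
-- the `for index in ordered: if index > current: return index` loop of A
def pyScanGt (current : Int) : List Int → Option Int
  | [] => none
  | x :: xs => if x > current then some x else pyScanGt current xs

def next_active_player_index_py (current_player : Int) (active_indices : List Int) : Option Int :=
  if active_indices = [] then none
  else
    let ordered := PySem.List.sorted (PySem.Set.ofList active_indices) (fun x => x) false
    let current := current_player
    if current ∈ ordered then some current
    else
      match pyScanGt current ordered with
      | some x => some x
      | none => ordered.head?   -- ordered[0]; ordered is nonempty here, so head? = some _

-- ===== PORT B =====
def next_active_player_index_py_alt (current_player : Int) (active_indices : List Int) : Option Int :=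
  let actives := PySem.Set.ofList active_indices
  if actives = [] then none
  else
    let current := current_player
    if current ∈ actives then some current
    else
      let greater := actives.filter (fun i => decide (current < i))
      if greater ≠ [] then PySem.List.min? greater (fun x => x)
      else PySem.List.min? actives (fun x => x)

-- ===== PRECONDITION & SPEC =====
def Spec_next_active_player_index_py (current_player : Int) (active_indices : List Int) (out : Option Int) : Prop := out = next_active_player_index_py_alt current_player active_indices
instance (current_player : Int) (active_indices : List Int) (out : Option Int) : Decidable (Spec_next_active_player_index_py current_player active_indices out) := by unfold Spec_next_active_player_index_py; infer_instance

-- ===== CLAIM (what is proved, stated in full; the proofs are below) =====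
def Claim_equal_next_active_player_index_py : Prop := ∀ (current_player : Int) (active_indices : List Int), Dom_next_active_player_index_py current_player active_indices → Spec_next_active_player_index_py current_player active_indices (next_active_player_index_py current_player active_indices)

-- ===== LEMMAS AND PROOFS =====

-- PySem.List.min? with the identity key is List.min?
theorem pymin_id_eq (l : List Int) : PySem.List.min? l (fun x => x) = l.min? := by
  cases l with
  | nil => rfl
  | cons x t => rw [PySem.List.min?_id_cons, List.min?_cons']

-- characterization of min? with identity key (value minimum; needs no Nodup)
theorem pymin_id_eq_some_iff (l : List Int) (m : Int) :
    PySem.List.min? l (fun x => x) = some m ↔ m ∈ l ∧ ∀ y ∈ l, m ≤ y := by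
  rw [pymin_id_eq]; exact List.min?_eq_some_iff

-- A's scan over a strictly increasing list yields the least element above `current`
theorem pyScanGt_spec (current : Int) (l : List Int) (hs : l.Pairwise (· < ·)) :
    (∀ m, pyScanGt current l = some m → m ∈ l ∧ current < m ∧ ∀ y ∈ l, current < y → m ≤ y) ∧
    (pyScanGt current l = none → ∀ y ∈ l, ¬ current < y) := by
  induction l with
  | nil => simp [pyScanGt]
  | cons x t ih =>
    have hp := List.pairwise_cons.mp hs
    have iht := ih hp.2
    constructor
    · intro m hm
      by_cases hx : current < x
      · simp [pyScanGt, hx] at hm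
        subst hm
        refine ⟨List.mem_cons_self, hx, ?_⟩
        intro y hy _
        rcases List.mem_cons.mp hy with h | h
        · omega
        · exact le_of_lt (hp.1 y h)
      · simp [pyScanGt, hx] at hm
        obtain ⟨h1, h2, h3⟩ := (iht.1 m) hm
        refine ⟨List.mem_cons_of_mem _ h1, h2, ?_⟩
        intro y hy hcy
        rcases List.mem_cons.mp hy with h | h
        · omega
        · exact h3 y h hcy
    · intro hn y hy
      by_cases hx : current < x
      · simp [pyScanGt, hx] at hn
      · simp [pyScanGt, hx] at hn
        rcases List.mem_cons.mp hy with h | h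
        · omega
        · exact iht.2 hn y h

-- ===== VERDICT (by name: the statement is the Claim_ definition above) =====
theorem next_active_player_index_py_spec : Claim_equal_next_active_player_index_py := by
  intro cp ai _
  unfold Spec_next_active_player_index_py next_active_player_index_py next_active_player_index_py_alt
  by_cases hnil : ai = []
  · subst hnil; rfl
  · simp only [hnil, if_false]
    set S := PySem.Set.ofList ai with hS
    have hSne : S ≠ [] := by
      intro h
      obtain ⟨x, hx⟩ := List.exists_mem_of_ne_nil ai hnil
      have : x ∈ S := by rw [hS]; exact (PySem.Set.mem_ofList ai x).mpr hx
      simp [h] at this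
    simp only [hSne, if_false]
    set ordered := PySem.List.sorted S (fun x => x) false with hord
    have hmem : ∀ z : Int, z ∈ ordered ↔ z ∈ S := fun z => PySem.List.mem_sorted S (fun x => x) false z
    have hsorted : ordered.Pairwise (· < ·) := by
      rw [hord, hS]; exact PySem.List.sorted_ofList_pairwise_lt ai
    by_cases hc : cp ∈ S
    · simp [hmem cp, hc]
    · have hc' : cp ∉ ordered := fun h => hc ((hmem cp).mp h)
      simp only [hc', hc, if_false]
      have hspec := pyScanGt_spec cp ordered hsorted
      cases hscan : pyScanGt cp ordered with
      | some m =>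
        obtain ⟨h1, h2, h3⟩ := hspec.1 m hscan
        have hmemf : m ∈ S.filter (fun i => decide (cp < i)) := by
          rw [List.mem_filter]
          exact ⟨(hmem m).mp h1, by simpa using h2⟩
        have hne : S.filter (fun i => decide (cp < i)) ≠ [] := by
          intro h; rw [h] at hmemf; simp at hmemf
        simp only [hne, ne_eq, not_false_iff, if_true]
        refine (Eq.symm ((pymin_id_eq_some_iff _ m).mpr ⟨hmemf, ?_⟩))
        intro y hy
        rw [List.mem_filter] at hy
        exact h3 y ((hmem y).mpr hy.1) (by simpa using hy.2)
      | none =>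
        have hnone := hspec.2 hscan
        have hfe : S.filter (fun i => decide (cp < i)) = [] := by
          rw [List.filter_eq_nil_iff]
          intro y hy
          simpa using hnone y ((hmem y).mpr hy)
        simp only [hfe, ne_eq, not_true, if_false]
        have hone : ordered ≠ [] := by
          intro h
          exact hSne ((PySem.List.sorted_eq_nil_iff ..).mp h)
        obtain ⟨h0, t, hcons⟩ := List.exists_cons_of_ne_nil hone
        rw [hcons]
        simp only [List.head?_cons]
        refine (Eq.symm ((pymin_id_eq_some_iff _ h0).mpr ⟨?_, ?_⟩))
        · have : h0 ∈ ordered := by rw [hcons]; exact List.mem_cons_self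
          exact (hmem h0).mp this
        · intro y hy
          exact PySem.List.key_head_sorted_le S (fun x => x) hcons y hy
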